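-- pv_equiv track=rewrite | github.com/descampsk/advent-of-code | 2022/jeanRobertII/09/mainP2.py | isTDiagonalToH
-- ===== SOURCE A (Python) =====
-- def isTDiagonalToH(tPosition, hPosition):
--     adjacentCases = [
--         (hPosition[0]-1, hPosition[1]+1),
--         (hPosition[0]-1, hPosition[1]-1),
--         (hPosition[0]+1, hPosition[1]+1),
--         (hPosition[0]+1, hPosition[1]-1),
--     ]
--
--     for adjacentCase in adjacentCases:
--         if tPosition == adjacentCase:
--             return True
--
--     return False
-- ===== SOURCE B (Python) =====
-- def isTDiagonalToH(tPosition, hPosition):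
--     return abs(tPosition[0] - hPosition[0]) == 1 and abs(tPosition[1] - hPosition[1]) == 1
-- ===== Notes on version B (the rewrite author's own statement) =====
-- stated objective: simpler
-- what changed: Replaces building the list of four diagonal neighbour tuples and scanning it with a closed-form arithmetic test |dx| == 1 and |dy| == 1.
import Mathlib
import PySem

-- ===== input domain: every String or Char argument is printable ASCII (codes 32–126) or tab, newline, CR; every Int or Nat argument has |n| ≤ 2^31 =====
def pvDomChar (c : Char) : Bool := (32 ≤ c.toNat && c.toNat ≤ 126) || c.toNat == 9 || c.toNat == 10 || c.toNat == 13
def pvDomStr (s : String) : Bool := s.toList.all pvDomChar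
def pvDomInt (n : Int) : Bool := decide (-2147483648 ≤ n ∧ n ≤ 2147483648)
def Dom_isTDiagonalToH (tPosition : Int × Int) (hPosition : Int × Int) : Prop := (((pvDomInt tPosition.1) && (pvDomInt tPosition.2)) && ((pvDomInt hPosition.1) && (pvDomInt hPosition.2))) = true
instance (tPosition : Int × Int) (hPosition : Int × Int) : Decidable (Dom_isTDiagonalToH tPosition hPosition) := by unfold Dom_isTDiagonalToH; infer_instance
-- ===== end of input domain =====

-- B replaces A's list of four diagonal neighbours and linear scan by the closed-form test |dx| = 1 ∧ |dy| = 1 (simpler).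

-- ===== PORT A =====
-- A builds the list of the four diagonal neighbours of hPosition and scans it for tPosition.
def isTDiagonalToH (tPosition : Int × Int) (hPosition : Int × Int) : Bool :=
  let adjacentCases : List (Int × Int) :=
    [ (hPosition.1 - 1, hPosition.2 + 1),
      (hPosition.1 - 1, hPosition.2 - 1),
      (hPosition.1 + 1, hPosition.2 + 1),
      (hPosition.1 + 1, hPosition.2 - 1) ]
  adjacentCases.foldl (fun acc adjacentCase => acc || (tPosition == adjacentCase)) false

-- ===== PORT B =====
def isTDiagonalToH_alt (tPosition : Int × Int) (hPosition : Int × Int) : Bool :=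
  ((tPosition.1 - hPosition.1).natAbs == 1) && ((tPosition.2 - hPosition.2).natAbs == 1)

-- ===== PRECONDITION & SPEC =====
def Spec_isTDiagonalToH (tPosition : Int × Int) (hPosition : Int × Int) (out : Bool) : Prop := out = isTDiagonalToH_alt tPosition hPosition
instance (tPosition : Int × Int) (hPosition : Int × Int) (out : Bool) : Decidable (Spec_isTDiagonalToH tPosition hPosition out) := by unfold Spec_isTDiagonalToH; infer_instance

-- ===== CLAIM (what is proved, stated in full; the proofs are below) =====
def Claim_equal_isTDiagonalToH : Prop := ∀ (tPosition : Int × Int) (hPosition : Int × Int), Dom_isTDiagonalToH tPosition hPosition → Spec_isTDiagonalToH tPosition hPosition (isTDiagonalToH tPosition hPosition)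

-- ===== LEMMAS AND PROOFS =====

-- ===== VERDICT (by name: the statement is the Claim_ definition above) =====
theorem isTDiagonalToH_spec : Claim_equal_isTDiagonalToH := by
  intro ⟨tx, ty⟩ ⟨hx, hy⟩ _
  unfold Spec_isTDiagonalToH isTDiagonalToH isTDiagonalToH_alt
  simp only [List.foldl, Bool.false_or]
  rw [Bool.eq_iff_iff]
  simp only [Bool.or_eq_true, beq_iff_eq, Prod.mk.injEq, Bool.and_eq_true, Int.natAbs_eq_iff]
  omega
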